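-- pv_equiv track=rewrite | github.com/priii-25/VigilAI | backend/src/services/seo/seo_tracker.py | categorize_page
-- ===== SOURCE A (Python) =====
-- def categorize_page(url: str) -> str:
--     """
--     Categorize a page based on URL patterns.
--
--     Args:
--         url: URL to categorize
--
--     Returns:
--         Category string
--     """
--     url_lower = url.lower()
--
--     if any(keyword in url_lower for keyword in ['/product/', '/products/', '/p/']):
--         return 'product'
--     elif any(keyword in url_lower for keyword in ['/blog/', '/news/', '/article/']):
--         return 'content'
--     elif any(keyword in url_lower for keyword in ['/pricing', '/plans']):
--         return 'pricing'
--     elif any(keyword in url_lower for keyword in ['/about', '/company']):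
--         return 'about'
--     elif any(keyword in url_lower for keyword in ['/careers', '/jobs']):
--         return 'careers'
--     elif any(keyword in url_lower for keyword in ['/case-study', '/customer', '/success']):
--         return 'case_study'
--     elif any(keyword in url_lower for keyword in ['/feature', '/solution']):
--         return 'feature'
--     else:
--         return 'other'
-- ===== SOURCE B (Python) =====
-- # Single left-to-right scan of the URL: at each position, check which keywords
-- # start there and keep the minimum category priority seen; map it to a name.
-- _KEYWORD_PRIORITY = {
--     '/product/': 0, '/products/': 0, '/p/': 0,
--     '/blog/': 1, '/news/': 1, '/article/': 1,
--     '/pricing': 2, '/plans': 2,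
--     '/about': 3, '/company': 3,
--     '/careers': 4, '/jobs': 4,
--     '/case-study': 5, '/customer': 5, '/success': 5,
--     '/feature': 6, '/solution': 6,
-- }
-- _NAMES = ['product', 'content', 'pricing', 'about', 'careers',
--           'case_study', 'feature', 'other']
--
-- def categorize_page(url: str) -> str:
--     u = url.lower()
--     best = 7
--     for i in range(len(u)):
--         for kw, pr in _KEYWORD_PRIORITY.items():
--             if pr < best and u.startswith(kw, i):
--                 best = pr
--     return _NAMES[best]
-- ===== Notes on version B (the rewrite author's own statement) =====
-- stated objective: alternative
-- what changed: Replaced the category-major if/elif of whole-string substring searches by a single string-major scan: one pass over the lowercased URL that, at each position, checks which keywords start there and keeps the minimum category priority, mapped to a name at the end.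
import Mathlib
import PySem

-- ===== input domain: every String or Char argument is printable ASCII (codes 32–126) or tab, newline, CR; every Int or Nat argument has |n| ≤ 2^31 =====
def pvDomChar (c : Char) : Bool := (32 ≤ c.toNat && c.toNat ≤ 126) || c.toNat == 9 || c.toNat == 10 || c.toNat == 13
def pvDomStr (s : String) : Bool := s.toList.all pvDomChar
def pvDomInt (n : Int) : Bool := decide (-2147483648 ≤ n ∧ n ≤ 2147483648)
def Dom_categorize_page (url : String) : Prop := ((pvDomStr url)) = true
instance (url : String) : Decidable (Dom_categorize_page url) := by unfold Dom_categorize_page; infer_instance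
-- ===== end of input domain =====

-- B replaces A's category-major if/elif of whole-string substring searches by a single string-major scan of the lowercased URL,
-- keeping the minimum priority of any keyword starting at each position (alternative traversal; not faster).


-- ===== PORT A =====
def categorize_page (url : String) : String :=
  let url_lower := PySem.Str.lower url
  if ["/product/", "/products/", "/p/"].any (fun k => PySem.Str.isIn k url_lower) then "product"
  else if ["/blog/", "/news/", "/article/"].any (fun k => PySem.Str.isIn k url_lower) then "content"
  else if ["/pricing", "/plans"].any (fun k => PySem.Str.isIn k url_lower) then "pricing"
  else if ["/about", "/company"].any (fun k => PySem.Str.isIn k url_lower) then "about"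
  else if ["/careers", "/jobs"].any (fun k => PySem.Str.isIn k url_lower) then "careers"
  else if ["/case-study", "/customer", "/success"].any (fun k => PySem.Str.isIn k url_lower) then "case_study"
  else if ["/feature", "/solution"].any (fun k => PySem.Str.isIn k url_lower) then "feature"
  else "other"

-- ===== PORT B =====
-- _KEYWORD_PRIORITY dict (association list, insertion order) and _NAMES table from Source B
def pvKwPr : List (String × Nat) :=
  [("/product/", 0), ("/products/", 0), ("/p/", 0),
   ("/blog/", 1), ("/news/", 1), ("/article/", 1),
   ("/pricing", 2), ("/plans", 2),
   ("/about", 3), ("/company", 3),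
   ("/careers", 4), ("/jobs", 4),
   ("/case-study", 5), ("/customer", 5), ("/success", 5),
   ("/feature", 6), ("/solution", 6)]

def pvNames : List String :=
  ["product", "content", "pricing", "about", "careers", "case_study", "feature", "other"]

-- u.startswith(kw, i) with 0 ≤ i < len(u) is exactly PySem.Chars.startswith (u.drop i) kw.toList;
-- _NAMES[best] is pyGetD with a never-taken default "" (best ≤ 7 < 8 always, see pvBest_le below).
def categorize_page_alt (url : String) : String :=
  let u := (PySem.Str.lower url).toList
  let best : Nat :=
    (List.range u.length).foldl (fun b i =>
      pvKwPr.foldl (fun b2 kp =>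
        if kp.2 < b2 && PySem.Chars.startswith (u.drop i) kp.1.toList then kp.2 else b2) b) 7
  PySem.List.pyGetD pvNames (best : Int) ""

-- ===== PRECONDITION & SPEC =====
def Spec_categorize_page (url : String) (out : String) : Prop := out = categorize_page_alt url
instance (url : String) (out : String) : Decidable (Spec_categorize_page url out) := by unfold Spec_categorize_page; infer_instance

-- ===== CLAIM (what is proved, stated in full; the proofs are below) =====
def Claim_equal_categorize_page : Prop := ∀ (url : String), Dom_categorize_page url → Spec_categorize_page url (categorize_page url)

-- ===== LEMMAS AND PROOFS =====

-- B's doubly-nested min-fold, named for the proofs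
def pvBest (u : List Char) : Nat :=
  (List.range u.length).foldl (fun b i =>
    pvKwPr.foldl (fun b2 kp =>
      if kp.2 < b2 && PySem.Chars.startswith (u.drop i) kp.1.toList then kp.2 else b2) b) 7

-- generic facts about a conditional-min foldl
lemma mfold_le {α : Type} (l : List α) (c : α → Bool) (g : α → Nat) (k : Nat) :
    l.foldl (fun a x => if g x < a && c x then g x else a) k ≤ k := by
  induction l generalizing k with
  | nil => simp
  | cons x t ih =>
    simp only [List.foldl_cons]
    split
    · exact le_trans (ih _) (by rename_i h; simp at h; omega)
    · exact ih _

lemma mfold_le_of_mem {α : Type} (c : α → Bool) (g : α → Nat) :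
    ∀ (l : List α) (k : Nat) (x : α), x ∈ l → c x = true →
      l.foldl (fun a x => if g x < a && c x then g x else a) k ≤ g x := by
  intro l
  induction l with
  | nil => intro k x hx; simp at hx
  | cons y t ih =>
    intro k x hx hc
    simp only [List.foldl_cons]
    rcases List.mem_cons.mp hx with rfl | hmem
    · by_cases h : g x < k
      · rw [if_pos (by simp [h, hc])]
        exact mfold_le t c g (g x)
      · rw [if_neg (by simp; omega)]
        exact le_trans (mfold_le t c g k) (by omega)
    · split
      · exact ih _ _ hmem hc
      · exact ih _ _ hmem hc

lemma mfold_eq_or {α : Type} (l : List α) (c : α → Bool) (g : α → Nat) (k : Nat) :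
    l.foldl (fun a x => if g x < a && c x then g x else a) k = k ∨
      ∃ x ∈ l, c x = true ∧ l.foldl (fun a x => if g x < a && c x then g x else a) k = g x := by
  induction l generalizing k with
  | nil => left; rfl
  | cons y t ih =>
    simp only [List.foldl_cons]
    split
    · rename_i h
      simp only [Bool.and_eq_true, decide_eq_true_eq] at h
      rcases ih (g y) with h1 | ⟨x, hx, hcx, hfx⟩
      · right; exact ⟨y, List.mem_cons_self .., h.2, h1⟩
      · right; exact ⟨x, List.mem_cons_of_mem _ hx, hcx, hfx⟩
    · rcases ih k with h1 | ⟨x, hx, hcx, hfx⟩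
      · left; exact h1
      · right; exact ⟨x, List.mem_cons_of_mem _ hx, hcx, hfx⟩

-- flatten B's nested fold into a single conditional-min fold over (position, keyword) pairs
lemma inner_as_map (u : List Char) (i : Nat) (kl : List (String × Nat)) :
    ∀ b : Nat,
      kl.foldl (fun b2 kp =>
        if kp.2 < b2 && PySem.Chars.startswith (u.drop i) kp.1.toList then kp.2 else b2) b
      = (kl.map (fun kp => (i, kp))).foldl
          (fun a x => if x.2.2 < a && PySem.Chars.startswith (u.drop x.1) x.2.1.toList then x.2.2 else a) b := by
  induction kl with
  | nil => intro b; rfl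
  | cons kp kt ih => intro b; simp only [List.map_cons, List.foldl_cons, ih]

lemma pvBest_as_single (u : List Char) :
    pvBest u
      = ((List.range u.length).flatMap (fun i => pvKwPr.map (fun kp => (i, kp)))).foldl
          (fun a x => if x.2.2 < a && PySem.Chars.startswith (u.drop x.1) x.2.1.toList then x.2.2 else a) 7 := by
  unfold pvBest
  generalize (7:Nat) = b
  induction (List.range u.length) generalizing b with
  | nil => rfl
  | cons i t ih =>
    simp only [List.foldl_cons]
    rw [ih, inner_as_map, List.flatMap_cons, List.foldl_append]

lemma pvBest_le (u : List Char) : pvBest u ≤ 7 := by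
  rw [pvBest_as_single]; exact mfold_le _ _ _ 7

-- "some keyword of priority p starts at some position of u"
def pvHit (u : List Char) (p : Nat) : Prop :=
  ∃ i < u.length, ∃ kp ∈ pvKwPr, kp.2 = p ∧ PySem.Chars.startswith (u.drop i) kp.1.toList = true

lemma pvBest_le_of_hit {u : List Char} {p : Nat} (h : pvHit u p) : pvBest u ≤ p := by
  obtain ⟨i, hi, kp, hkp, hp, hs⟩ := h
  rw [pvBest_as_single]
  have := mfold_le_of_mem
    (fun x => PySem.Chars.startswith (u.drop x.1) x.2.1.toList) (fun x => x.2.2)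
    ((List.range u.length).flatMap (fun i => pvKwPr.map (fun kp => (i, kp)))) 7 (i, kp)
    (by simp only [List.mem_flatMap, List.mem_map, List.mem_range]; exact ⟨i, hi, kp, hkp, rfl⟩)
    hs
  simp only at this
  omega

lemma pvBest_ne_of_not_hit {u : List Char} {p : Nat} (hp : p < 7) (h : ¬ pvHit u p) : pvBest u ≠ p := by
  intro hb
  rcases mfold_eq_or ((List.range u.length).flatMap (fun i => pvKwPr.map (fun kp => (i, kp))))
      (fun x => PySem.Chars.startswith (u.drop x.1) x.2.1.toList) (fun x => x.2.2) 7 with h7 | ⟨x, hx, hcx, hfx⟩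
  · rw [pvBest_as_single] at hb; omega
  · rw [pvBest_as_single] at hb
    simp only [List.mem_flatMap, List.mem_map, List.mem_range] at hx
    obtain ⟨i, hi, kp, hkp, rfl⟩ := hx
    simp only at hfx
    exact h ⟨i, hi, kp, hkp, by omega, hcx⟩

-- a nonempty keyword occurs as a substring iff it starts at some position i < length
lemma kw_bridge (u k : List Char) (hk : k ≠ []) :
    (∃ i < u.length, PySem.Chars.startswith (u.drop i) k = true) ↔ PySem.Chars.isIn k u = true := by
  rw [← PySem.Chars.exists_prefix_drop_iff_isIn]
  constructor
  · rintro ⟨i, _, hs⟩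
    exact ⟨i, (PySem.Chars.startswith_iff _ _).mp hs⟩
  · rintro ⟨j, hp⟩
    by_cases hj : j < u.length
    · exact ⟨j, hj, (PySem.Chars.startswith_iff _ _).mpr hp⟩
    · exfalso
      have hd : u.drop j = [] := List.drop_eq_nil_of_le (by omega)
      rw [hd] at hp
      exact hk (List.prefix_nil.mp hp)

-- pvHit p ↔ A's membership test for priority p's keyword list
lemma pvHit_iff (u : List Char) (p : Nat) (ks : List String)
    (hks1 : ∀ s q, (s, q) ∈ pvKwPr → q = p → s ∈ ks)
    (hks2 : ∀ s ∈ ks, (s, p) ∈ pvKwPr)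
    (hne : ∀ s ∈ ks, s.toList ≠ []) :
    pvHit u p ↔ (ks.any (fun s => PySem.Chars.isIn s.toList u)) = true := by
  rw [List.any_eq_true]
  unfold pvHit
  constructor
  · rintro ⟨i, hi, kp, hkp, hp, hs⟩
    have hmem : kp.1 ∈ ks := hks1 kp.1 kp.2 hkp hp
    exact ⟨kp.1, hmem, (kw_bridge u kp.1.toList (hne _ hmem)).mp ⟨i, hi, hs⟩⟩
  · rintro ⟨s, hsks, hin⟩
    obtain ⟨i, hi, hs⟩ := (kw_bridge u s.toList (hne _ hsks)).mpr hin
    exact ⟨i, hi, (s, p), hks2 s hsks, rfl, hs⟩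

-- ===== VERDICT (by name: the statement is the Claim_ definition above) =====
theorem categorize_page_spec : Claim_equal_categorize_page := by
  intro url _
  unfold Spec_categorize_page
  show categorize_page url = PySem.List.pyGetD pvNames ((pvBest (PySem.Str.lower url).toList : Nat) : Int) ""
  set u := (PySem.Str.lower url).toList with hu
  have h0 := pvHit_iff u 0 ["/product/", "/products/", "/p/"]
      (by intro s q hm hq
          simp only [pvKwPr, List.mem_cons, Prod.mk.injEq, List.not_mem_nil, or_false] at hm
          rcases hm with (⟨rfl,rfl⟩|⟨rfl,rfl⟩|⟨rfl,rfl⟩|⟨rfl,rfl⟩|⟨rfl,rfl⟩|⟨rfl,rfl⟩|⟨rfl,rfl⟩|⟨rfl,rfl⟩|⟨rfl,rfl⟩|⟨rfl,rfl⟩|⟨rfl,rfl⟩|⟨rfl,rfl⟩|⟨rfl,rfl⟩|⟨rfl,rfl⟩|⟨rfl,rfl⟩|⟨rfl,rfl⟩|⟨rfl,rfl⟩) <;> first | decide | omega)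
      (by decide) (by decide)
  have h1 := pvHit_iff u 1 ["/blog/", "/news/", "/article/"]
      (by intro s q hm hq
          simp only [pvKwPr, List.mem_cons, Prod.mk.injEq, List.not_mem_nil, or_false] at hm
          rcases hm with (⟨rfl,rfl⟩|⟨rfl,rfl⟩|⟨rfl,rfl⟩|⟨rfl,rfl⟩|⟨rfl,rfl⟩|⟨rfl,rfl⟩|⟨rfl,rfl⟩|⟨rfl,rfl⟩|⟨rfl,rfl⟩|⟨rfl,rfl⟩|⟨rfl,rfl⟩|⟨rfl,rfl⟩|⟨rfl,rfl⟩|⟨rfl,rfl⟩|⟨rfl,rfl⟩|⟨rfl,rfl⟩|⟨rfl,rfl⟩) <;> first | decide | omega)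
      (by decide) (by decide)
  have h2 := pvHit_iff u 2 ["/pricing", "/plans"]
      (by intro s q hm hq
          simp only [pvKwPr, List.mem_cons, Prod.mk.injEq, List.not_mem_nil, or_false] at hm
          rcases hm with (⟨rfl,rfl⟩|⟨rfl,rfl⟩|⟨rfl,rfl⟩|⟨rfl,rfl⟩|⟨rfl,rfl⟩|⟨rfl,rfl⟩|⟨rfl,rfl⟩|⟨rfl,rfl⟩|⟨rfl,rfl⟩|⟨rfl,rfl⟩|⟨rfl,rfl⟩|⟨rfl,rfl⟩|⟨rfl,rfl⟩|⟨rfl,rfl⟩|⟨rfl,rfl⟩|⟨rfl,rfl⟩|⟨rfl,rfl⟩) <;> first | decide | omega)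
      (by decide) (by decide)
  have h3 := pvHit_iff u 3 ["/about", "/company"]
      (by intro s q hm hq
          simp only [pvKwPr, List.mem_cons, Prod.mk.injEq, List.not_mem_nil, or_false] at hm
          rcases hm with (⟨rfl,rfl⟩|⟨rfl,rfl⟩|⟨rfl,rfl⟩|⟨rfl,rfl⟩|⟨rfl,rfl⟩|⟨rfl,rfl⟩|⟨rfl,rfl⟩|⟨rfl,rfl⟩|⟨rfl,rfl⟩|⟨rfl,rfl⟩|⟨rfl,rfl⟩|⟨rfl,rfl⟩|⟨rfl,rfl⟩|⟨rfl,rfl⟩|⟨rfl,rfl⟩|⟨rfl,rfl⟩|⟨rfl,rfl⟩) <;> first | decide | omega)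
      (by decide) (by decide)
  have h4 := pvHit_iff u 4 ["/careers", "/jobs"]
      (by intro s q hm hq
          simp only [pvKwPr, List.mem_cons, Prod.mk.injEq, List.not_mem_nil, or_false] at hm
          rcases hm with (⟨rfl,rfl⟩|⟨rfl,rfl⟩|⟨rfl,rfl⟩|⟨rfl,rfl⟩|⟨rfl,rfl⟩|⟨rfl,rfl⟩|⟨rfl,rfl⟩|⟨rfl,rfl⟩|⟨rfl,rfl⟩|⟨rfl,rfl⟩|⟨rfl,rfl⟩|⟨rfl,rfl⟩|⟨rfl,rfl⟩|⟨rfl,rfl⟩|⟨rfl,rfl⟩|⟨rfl,rfl⟩|⟨rfl,rfl⟩) <;> first | decide | omega)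
      (by decide) (by decide)
  have h5 := pvHit_iff u 5 ["/case-study", "/customer", "/success"]
      (by intro s q hm hq
          simp only [pvKwPr, List.mem_cons, Prod.mk.injEq, List.not_mem_nil, or_false] at hm
          rcases hm with (⟨rfl,rfl⟩|⟨rfl,rfl⟩|⟨rfl,rfl⟩|⟨rfl,rfl⟩|⟨rfl,rfl⟩|⟨rfl,rfl⟩|⟨rfl,rfl⟩|⟨rfl,rfl⟩|⟨rfl,rfl⟩|⟨rfl,rfl⟩|⟨rfl,rfl⟩|⟨rfl,rfl⟩|⟨rfl,rfl⟩|⟨rfl,rfl⟩|⟨rfl,rfl⟩|⟨rfl,rfl⟩|⟨rfl,rfl⟩) <;> first | decide | omega)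
      (by decide) (by decide)
  have h6 := pvHit_iff u 6 ["/feature", "/solution"]
      (by intro s q hm hq
          simp only [pvKwPr, List.mem_cons, Prod.mk.injEq, List.not_mem_nil, or_false] at hm
          rcases hm with (⟨rfl,rfl⟩|⟨rfl,rfl⟩|⟨rfl,rfl⟩|⟨rfl,rfl⟩|⟨rfl,rfl⟩|⟨rfl,rfl⟩|⟨rfl,rfl⟩|⟨rfl,rfl⟩|⟨rfl,rfl⟩|⟨rfl,rfl⟩|⟨rfl,rfl⟩|⟨rfl,rfl⟩|⟨rfl,rfl⟩|⟨rfl,rfl⟩|⟨rfl,rfl⟩|⟨rfl,rfl⟩|⟨rfl,rfl⟩) <;> first | decide | omega)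
      (by decide) (by decide)
  unfold categorize_page
  simp only [PySem.Str.isIn_eq, ← hu] at *
  by_cases c0 : ((["/product/", "/products/", "/p/"]).any (fun s => PySem.Chars.isIn s.toList u)) = true
  · have hb : pvBest u = 0 := by
      have hle : pvBest u ≤ 0 := pvBest_le_of_hit (h0.mpr c0)
      omega
    rw [hb, show PySem.List.pyGetD pvNames ((0 : Nat) : Int) "" = "product" from by decide]
    simp [c0]
  by_cases c1 : ((["/blog/", "/news/", "/article/"]).any (fun s => PySem.Chars.isIn s.toList u)) = true
  · have hb : pvBest u = 1 := by
      have hle : pvBest u ≤ 1 := pvBest_le_of_hit (h1.mpr c1)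
      have hne0 : pvBest u ≠ 0 := pvBest_ne_of_not_hit (by omega) (fun hh => c0 (h0.mp hh))
      omega
    rw [hb, show PySem.List.pyGetD pvNames ((1 : Nat) : Int) "" = "content" from by decide]
    simp only [Bool.not_eq_true] at c0
    simp [c0, c1]
  by_cases c2 : ((["/pricing", "/plans"]).any (fun s => PySem.Chars.isIn s.toList u)) = true
  · have hb : pvBest u = 2 := by
      have hle : pvBest u ≤ 2 := pvBest_le_of_hit (h2.mpr c2)
      have hne0 : pvBest u ≠ 0 := pvBest_ne_of_not_hit (by omega) (fun hh => c0 (h0.mp hh))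
      have hne1 : pvBest u ≠ 1 := pvBest_ne_of_not_hit (by omega) (fun hh => c1 (h1.mp hh))
      omega
    rw [hb, show PySem.List.pyGetD pvNames ((2 : Nat) : Int) "" = "pricing" from by decide]
    simp only [Bool.not_eq_true] at c0 c1
    simp [c0, c1, c2]
  by_cases c3 : ((["/about", "/company"]).any (fun s => PySem.Chars.isIn s.toList u)) = true
  · have hb : pvBest u = 3 := by
      have hle : pvBest u ≤ 3 := pvBest_le_of_hit (h3.mpr c3)
      have hne0 : pvBest u ≠ 0 := pvBest_ne_of_not_hit (by omega) (fun hh => c0 (h0.mp hh))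
      have hne1 : pvBest u ≠ 1 := pvBest_ne_of_not_hit (by omega) (fun hh => c1 (h1.mp hh))
      have hne2 : pvBest u ≠ 2 := pvBest_ne_of_not_hit (by omega) (fun hh => c2 (h2.mp hh))
      omega
    rw [hb, show PySem.List.pyGetD pvNames ((3 : Nat) : Int) "" = "about" from by decide]
    simp only [Bool.not_eq_true] at c0 c1 c2
    simp [c0, c1, c2, c3]
  by_cases c4 : ((["/careers", "/jobs"]).any (fun s => PySem.Chars.isIn s.toList u)) = true
  · have hb : pvBest u = 4 := by
      have hle : pvBest u ≤ 4 := pvBest_le_of_hit (h4.mpr c4)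
      have hne0 : pvBest u ≠ 0 := pvBest_ne_of_not_hit (by omega) (fun hh => c0 (h0.mp hh))
      have hne1 : pvBest u ≠ 1 := pvBest_ne_of_not_hit (by omega) (fun hh => c1 (h1.mp hh))
      have hne2 : pvBest u ≠ 2 := pvBest_ne_of_not_hit (by omega) (fun hh => c2 (h2.mp hh))
      have hne3 : pvBest u ≠ 3 := pvBest_ne_of_not_hit (by omega) (fun hh => c3 (h3.mp hh))
      omega
    rw [hb, show PySem.List.pyGetD pvNames ((4 : Nat) : Int) "" = "careers" from by decide]
    simp only [Bool.not_eq_true] at c0 c1 c2 c3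
    simp [c0, c1, c2, c3, c4]
  by_cases c5 : ((["/case-study", "/customer", "/success"]).any (fun s => PySem.Chars.isIn s.toList u)) = true
  · have hb : pvBest u = 5 := by
      have hle : pvBest u ≤ 5 := pvBest_le_of_hit (h5.mpr c5)
      have hne0 : pvBest u ≠ 0 := pvBest_ne_of_not_hit (by omega) (fun hh => c0 (h0.mp hh))
      have hne1 : pvBest u ≠ 1 := pvBest_ne_of_not_hit (by omega) (fun hh => c1 (h1.mp hh))
      have hne2 : pvBest u ≠ 2 := pvBest_ne_of_not_hit (by omega) (fun hh => c2 (h2.mp hh))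
      have hne3 : pvBest u ≠ 3 := pvBest_ne_of_not_hit (by omega) (fun hh => c3 (h3.mp hh))
      have hne4 : pvBest u ≠ 4 := pvBest_ne_of_not_hit (by omega) (fun hh => c4 (h4.mp hh))
      omega
    rw [hb, show PySem.List.pyGetD pvNames ((5 : Nat) : Int) "" = "case_study" from by decide]
    simp only [Bool.not_eq_true] at c0 c1 c2 c3 c4
    simp [c0, c1, c2, c3, c4, c5]
  by_cases c6 : ((["/feature", "/solution"]).any (fun s => PySem.Chars.isIn s.toList u)) = true
  · have hb : pvBest u = 6 := by
      have hle : pvBest u ≤ 6 := pvBest_le_of_hit (h6.mpr c6)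
      have hne0 : pvBest u ≠ 0 := pvBest_ne_of_not_hit (by omega) (fun hh => c0 (h0.mp hh))
      have hne1 : pvBest u ≠ 1 := pvBest_ne_of_not_hit (by omega) (fun hh => c1 (h1.mp hh))
      have hne2 : pvBest u ≠ 2 := pvBest_ne_of_not_hit (by omega) (fun hh => c2 (h2.mp hh))
      have hne3 : pvBest u ≠ 3 := pvBest_ne_of_not_hit (by omega) (fun hh => c3 (h3.mp hh))
      have hne4 : pvBest u ≠ 4 := pvBest_ne_of_not_hit (by omega) (fun hh => c4 (h4.mp hh))
      have hne5 : pvBest u ≠ 5 := pvBest_ne_of_not_hit (by omega) (fun hh => c5 (h5.mp hh))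
      omega
    rw [hb, show PySem.List.pyGetD pvNames ((6 : Nat) : Int) "" = "feature" from by decide]
    simp only [Bool.not_eq_true] at c0 c1 c2 c3 c4 c5
    simp [c0, c1, c2, c3, c4, c5, c6]
  have hb : pvBest u = 7 := by
    have hle : pvBest u ≤ 7 := pvBest_le u
    have hne0 : pvBest u ≠ 0 := pvBest_ne_of_not_hit (by omega) (fun hh => c0 (h0.mp hh))
    have hne1 : pvBest u ≠ 1 := pvBest_ne_of_not_hit (by omega) (fun hh => c1 (h1.mp hh))
    have hne2 : pvBest u ≠ 2 := pvBest_ne_of_not_hit (by omega) (fun hh => c2 (h2.mp hh))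
    have hne3 : pvBest u ≠ 3 := pvBest_ne_of_not_hit (by omega) (fun hh => c3 (h3.mp hh))
    have hne4 : pvBest u ≠ 4 := pvBest_ne_of_not_hit (by omega) (fun hh => c4 (h4.mp hh))
    have hne5 : pvBest u ≠ 5 := pvBest_ne_of_not_hit (by omega) (fun hh => c5 (h5.mp hh))
    have hne6 : pvBest u ≠ 6 := pvBest_ne_of_not_hit (by omega) (fun hh => c6 (h6.mp hh))
    omega
  rw [hb, show PySem.List.pyGetD pvNames ((7 : Nat) : Int) "" = "other" from by decide]
  simp only [Bool.not_eq_true] at c0 c1 c2 c3 c4 c5 c6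
  simp [c0, c1, c2, c3, c4, c5, c6]
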